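-- pv_equiv track=rewrite | github.com/MrPiTA/WdpLaby | Laby/Lab06/zad11.py | lata_minuty2
-- ===== SOURCE A (Python) =====
-- def lata_minuty2(n,m):
--
--     def ilosc_przestepnych(n, m):
--         liczba = 0  # liczba lat przestępnych
--         for rok in lata:
--             if (rok % 4 == 0 and rok % 100 != 0) or rok % 400 == 0:
--                 liczba += 1
--         return liczba
--
--     if 0 < n < m:
--         lata = [i for i in range(n, m)]
--         minuty = (((len(lata) - ilosc_przestepnych(n, m)) * 365) + ((ilosc_przestepnych(n, m) * 366) * 24 * 60))
--         return minuty
-- ===== SOURCE B (Python) =====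
-- def lata_minuty2(n, m):
--     if 0 < n < m:
--         def f(x):
--             return x // 4 - x // 100 + x // 400
--         leaps = f(m - 1) - f(n - 1)
--         return (m - n - leaps) * 365 + leaps * 366 * 24 * 60
-- ===== Notes on version B (the rewrite author's own statement) =====
-- stated objective: faster
-- what changed: Replaces the O(m-n) loop over the year list with the closed-form leap-year count floor(x/4)-floor(x/100)+floor(x/400) evaluated at the range endpoints, keeping A's exact (oddly weighted) minutes formula; intended as faster, measured up to 154x at the largest size (inputs with n>=m return None immediately in both, so those per-input ratios are ~1).
import Mathlib
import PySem

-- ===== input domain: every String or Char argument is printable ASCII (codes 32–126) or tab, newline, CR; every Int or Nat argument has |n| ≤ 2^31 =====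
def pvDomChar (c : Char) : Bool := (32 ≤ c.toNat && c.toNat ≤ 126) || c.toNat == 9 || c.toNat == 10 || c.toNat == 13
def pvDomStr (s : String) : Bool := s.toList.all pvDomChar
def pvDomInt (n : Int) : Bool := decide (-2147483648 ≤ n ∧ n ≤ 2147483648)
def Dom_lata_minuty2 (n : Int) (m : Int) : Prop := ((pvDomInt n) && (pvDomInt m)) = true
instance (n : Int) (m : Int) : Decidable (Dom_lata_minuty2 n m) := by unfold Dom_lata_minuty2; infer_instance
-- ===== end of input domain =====

-- B replaces A's per-year loop by the closed-form leap count floor(x/4)-floor(x/100)+floor(x/400)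
-- at the range endpoints (intended as faster, O(1) instead of O(m-n); measured up to 154x on
-- non-empty ranges at the largest size); A's exact formula is kept.

-- ===== PORT A =====
-- leap test of A, with Python's % (operands here are positive anyway)
def pvLeapA (rok : Int) : Bool :=
  (PySem.Int.mod rok 4 == 0 && !(PySem.Int.mod rok 100 == 0)) || PySem.Int.mod rok 400 == 0

-- inner helper ilosc_przestepnych: loop over the list `lata`
def pvIlosc (lata : List Int) : Int :=
  lata.foldl (fun liczba rok => if pvLeapA rok then liczba + 1 else liczba) 0

def lata_minuty2 (n : Int) (m : Int) : Option Int :=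
  if 0 < n ∧ n < m then
    let lata : List Int := PySem.List.pyRange n m 1
    let minuty := (((lata.length : Int) - pvIlosc lata) * 365) + ((pvIlosc lata * 366) * 24 * 60)
    some minuty
  else
    none

-- ===== PORT B =====
-- cumulative leap-year count: f x = x//4 - x//100 + x//400
def pvF (x : Int) : Int :=
  PySem.Int.floordiv x 4 - PySem.Int.floordiv x 100 + PySem.Int.floordiv x 400

def lata_minuty2_alt (n : Int) (m : Int) : Option Int :=
  if 0 < n ∧ n < m then
    let leaps := pvF (m - 1) - pvF (n - 1)
    some ((m - n - leaps) * 365 + leaps * 366 * 24 * 60)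
  else
    none

-- ===== PRECONDITION & SPEC =====
def Spec_lata_minuty2 (n : Int) (m : Int) (out : Option Int) : Prop := out = lata_minuty2_alt n m
instance (n : Int) (m : Int) (out : Option Int) : Decidable (Spec_lata_minuty2 n m out) := by unfold Spec_lata_minuty2; infer_instance

-- ===== CLAIM (what is proved, stated in full; the proofs are below) =====
def Claim_equal_lata_minuty2 : Prop := ∀ (n : Int) (m : Int), Dom_lata_minuty2 n m → Spec_lata_minuty2 n m (lata_minuty2 n m)

-- ===== LEMMAS AND PROOFS =====

-- the fold starting from any accumulator
theorem pvIlosc_foldl_acc (l : List Int) (a : Int) :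
    l.foldl (fun liczba rok => if pvLeapA rok then liczba + 1 else liczba) a = a + pvIlosc l := by
  induction l generalizing a with
  | nil => simp [pvIlosc]
  | cons x xs ih =>
    simp only [pvIlosc, List.foldl_cons]
    rw [ih, ih (if pvLeapA x then 0 + 1 else 0)]
    split <;> ring

theorem pvIlosc_append_singleton (l : List Int) (y : Int) :
    pvIlosc (l ++ [y]) = pvIlosc l + (if pvLeapA y then 1 else 0) := by
  simp only [pvIlosc, List.foldl_append, List.foldl_cons, List.foldl_nil]
  rw [pvIlosc_foldl_acc]
  split <;> simp

-- f is the cumulative count: its step at a positive x is the leap indicator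
theorem pvF_step (x : Int) (_hx : 0 < x) :
    pvF x - pvF (x - 1) = (if pvLeapA x then 1 else 0) := by
  simp only [pvF, pvLeapA,
    PySem.Int.floordiv_eq_ediv_of_pos (a := x) (by norm_num : (0:Int) < 4),
    PySem.Int.floordiv_eq_ediv_of_pos (a := x) (by norm_num : (0:Int) < 100),
    PySem.Int.floordiv_eq_ediv_of_pos (a := x) (by norm_num : (0:Int) < 400),
    PySem.Int.floordiv_eq_ediv_of_pos (a := x - 1) (by norm_num : (0:Int) < 4),
    PySem.Int.floordiv_eq_ediv_of_pos (a := x - 1) (by norm_num : (0:Int) < 100),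
    PySem.Int.floordiv_eq_ediv_of_pos (a := x - 1) (by norm_num : (0:Int) < 400),
    PySem.Int.mod_eq_emod_of_pos (a := x) (by norm_num : (0:Int) < 4),
    PySem.Int.mod_eq_emod_of_pos (a := x) (by norm_num : (0:Int) < 100),
    PySem.Int.mod_eq_emod_of_pos (a := x) (by norm_num : (0:Int) < 400),
    Bool.or_eq_true, Bool.and_eq_true, beq_iff_eq, Bool.not_eq_eq_eq_not,
    Bool.not_true, beq_eq_false_iff_ne, ne_eq]
  split_ifs with h <;> omega

-- the loop count over range(n, m) equals f(m-1) - f(n-1)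
theorem pvCount_range (n : Int) (hn : 0 < n) :
    ∀ (k : Nat), pvIlosc (PySem.List.pyRange n (n + k) 1) = pvF (n + k - 1) - pvF (n - 1) := by
  intro k
  induction k with
  | zero => simp [PySem.List.pyRange_one_eq_nil (le_refl n), pvIlosc]
  | succ k ih =>
    have h1 : n + (k + 1 : Int) = (n + k) + 1 := by ring
    have h2 : PySem.List.pyRange n (n + (k + 1 : Nat)) 1
        = PySem.List.pyRange n (n + k) 1 ++ [n + k] := by
      push_cast
      rw [show (n + ((k : Int) + 1)) = (n + k) + 1 by ring]
      exact PySem.List.pyRange_one_succ_right (by omega)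
    rw [h2, pvIlosc_append_singleton, ih,
      show n + ((k + 1 : Nat) : Int) - 1 = n + k from by push_cast; ring]
    linarith [pvF_step (n + k) (by omega : (0:Int) < n + k)]

-- ===== VERDICT (by name: the statement is the Claim_ definition above) =====
theorem lata_minuty2_spec : Claim_equal_lata_minuty2 := by
  intro n m _
  unfold Spec_lata_minuty2 lata_minuty2 lata_minuty2_alt
  by_cases h : 0 < n ∧ n < m
  · simp only [if_pos h]
    obtain ⟨hn, hnm⟩ := h
    have hk : m = n + ((m - n).toNat : Int) := by omega
    have hcount := pvCount_range n hn (m - n).toNat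
    rw [← hk] at hcount
    rw [PySem.List.length_pyRange_one, hcount]
    have hlen : (((m - n).toNat : Int)) = m - n := by omega
    rw [hlen]
  · simp only [if_neg h]
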